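-- pv_equiv track=rewrite | github.com/vbashtyrev/uplink | netbox_checks.py | _filter_no_diff_cols
-- ===== SOURCE A (Python) =====
-- DIFF_GROUPS_BY_NOTE = {
--     "nD": {"descF", "descN", "nD", "descToSet"},
--     "nM": {"mtF", "mtN", "nM", "mtToSet"},
--     "nB": {"bwF", "speedN", "nB", "speedToSet"},
--     "nDup": {"dupF", "dupN", "nDup", "dupToSet"},
--     "nMac": {"macF", "macN", "nMac"},
--     "nMtu": {"mtuF", "mtuN", "nMtu", "mtuToSet"},
--     "nTxp": {"txpF", "txpN", "nTxp", "txpToSet"},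
--     "nFwd": {"fwdF", "fwdN", "nFwd", "fwdToSet"},
--     "nIp": {"ipF", "ipN", "ipVrfF", "ipVrfN", "nIp"},
--     "nLag": {"lagF", "lagN", "nLag"},
-- }
--
-- def _filter_no_diff_cols(col_spec, rows):
--     """Убрать группы колонок (файл/Netbox/примечание), где во всех строках примечание пусто — расхождений нет."""
--     headers_in_spec = {c[0] for c in col_spec}
--     cols_to_remove = set()
--     for note, group in DIFF_GROUPS_BY_NOTE.items():
--         if note not in headers_in_spec:
--             continue
--         note_col = next((c for c in col_spec if c[0] == note), None)
--         if not note_col: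
--             continue
--         _, note_idx, _ = note_col
--         if all(note_idx >= len(r) or not r[note_idx] for r in rows):
--             cols_to_remove |= (group & headers_in_spec)
--     return [c for c in col_spec if c[0] not in cols_to_remove]
-- ===== SOURCE B (Python) =====
-- DIFF_GROUPS_BY_NOTE = {
--     "nD": {"descF", "descN", "nD", "descToSet"},
--     "nM": {"mtF", "mtN", "nM", "mtToSet"},
--     "nB": {"bwF", "speedN", "nB", "speedToSet"},
--     "nDup": {"dupF", "dupN", "nDup", "dupToSet"},
--     "nMac": {"macF", "macN", "nMac"},
--     "nMtu": {"mtuF", "mtuN", "nMtu", "mtuToSet"},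
--     "nTxp": {"txpF", "txpN", "nTxp", "txpToSet"},
--     "nFwd": {"fwdF", "fwdN", "nFwd", "fwdToSet"},
--     "nIp": {"ipF", "ipN", "ipVrfF", "ipVrfN", "nIp"},
--     "nLag": {"lagF", "lagN", "nLag"},
-- }
--
--
-- def _filter_no_diff_cols(col_spec, rows):
--     """One pass over col_spec builds note->first index, then one pass over rows
--     winnows the still-everywhere-empty notes (alternative decomposition of the same task)."""
--     headers_in_spec = {c[0] for c in col_spec}
--     note_to_idx = {}
--     for name, idx, _ in col_spec:
--         if name in DIFF_GROUPS_BY_NOTE and name not in note_to_idx: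
--             note_to_idx[name] = idx
--     empty_notes = list(note_to_idx)
--     for r in rows:
--         empty_notes = [n for n in empty_notes
--                        if not (note_to_idx[n] < len(r) and r[note_to_idx[n]])]
--     cols_to_remove = set()
--     for n in empty_notes:
--         cols_to_remove |= (DIFF_GROUPS_BY_NOTE[n] & headers_in_spec)
--     return [c for c in col_spec if c[0] not in cols_to_remove]
-- ===== Notes on version B (the rewrite author's own statement) =====
-- stated objective: alternative
-- what changed: Instead of scanning col_spec with next() and re-scanning all rows separately for each of the 10 note groups, B builds a note->first-index dict in one pass over col_spec and winnows the set of everywhere-empty notes in one pass over rows; it trades A's per-group rescans for a dict and a live-note list.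
-- outside the precondition, e.g. on _filter_no_diff_cols([('nD', -2, 'x')], [['a', 'b'], []]): A returns [('nD', -2, 'x')], B returns [('nD', -2, 'x')]
import Mathlib
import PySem

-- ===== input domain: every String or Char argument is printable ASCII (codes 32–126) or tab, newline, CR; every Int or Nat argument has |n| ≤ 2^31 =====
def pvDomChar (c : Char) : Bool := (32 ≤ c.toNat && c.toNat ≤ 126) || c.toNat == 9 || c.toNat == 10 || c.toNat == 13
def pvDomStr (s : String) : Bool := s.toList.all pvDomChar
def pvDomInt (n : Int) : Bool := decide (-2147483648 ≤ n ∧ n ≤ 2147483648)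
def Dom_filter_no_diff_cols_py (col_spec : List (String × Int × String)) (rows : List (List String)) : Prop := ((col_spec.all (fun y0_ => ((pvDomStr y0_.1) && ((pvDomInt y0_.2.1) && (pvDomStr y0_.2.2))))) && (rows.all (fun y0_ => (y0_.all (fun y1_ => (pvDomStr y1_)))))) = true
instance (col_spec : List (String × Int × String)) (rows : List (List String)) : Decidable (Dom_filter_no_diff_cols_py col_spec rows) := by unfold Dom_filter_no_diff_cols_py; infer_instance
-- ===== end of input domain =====

-- B replaces A's per-note rescan of col_spec (next) and of all rows by one col_spec pass building a
-- note→first-index dict and one rows pass winnowing the still-empty notes (objective: alternative decomposition).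
-- Equivalence is about the RETURN value; neither version mutates its arguments.

-- ===== PORT A =====
-- DIFF_GROUPS_BY_NOTE: dict of sets → assoc list of element lists (each group is consumed only
-- set-wise — intersection then union into a set used for membership — so list order is immaterial).
def pvDiffGroups : List (String × List String) :=
  [("nD", ["descF", "descN", "nD", "descToSet"]),
   ("nM", ["mtF", "mtN", "nM", "mtToSet"]),
   ("nB", ["bwF", "speedN", "nB", "speedToSet"]),
   ("nDup", ["dupF", "dupN", "nDup", "dupToSet"]),
   ("nMac", ["macF", "macN", "nMac"]),
   ("nMtu", ["mtuF", "mtuN", "nMtu", "mtuToSet"]),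
   ("nTxp", ["txpF", "txpN", "nTxp", "txpToSet"]),
   ("nFwd", ["fwdF", "fwdN", "nFwd", "fwdToSet"]),
   ("nIp", ["ipF", "ipN", "ipVrfF", "ipVrfN", "nIp"]),
   ("nLag", ["lagF", "lagN", "nLag"])]

-- 'r[note_idx]' is ported with pyGetD: exact whenever the access does not raise (guaranteed by Pre_).
def filter_no_diff_cols_py (col_spec : List (String × Int × String)) (rows : List (List String)) : List (String × Int × String) :=
  let headers_in_spec := PySem.Set.ofList (col_spec.map (·.1))
  let cols_to_remove := pvDiffGroups.foldl (fun acc ng =>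
    if !(PySem.Set.contains headers_in_spec ng.1) then acc
    else
      match col_spec.find? (fun c => c.1 == ng.1) with
      | none => acc
      | some note_col =>
        if rows.all (fun r => decide ((r.length : Int) ≤ note_col.2.1) || (PySem.List.pyGetD r note_col.2.1 "" == "")) then
          PySem.Set.union acc (PySem.Set.inter (PySem.Set.ofList ng.2) headers_in_spec)
        else acc) PySem.Set.empty
  col_spec.filter (fun c => !(PySem.Set.contains cols_to_remove c.1))

-- ===== PORT B =====
def filter_no_diff_cols_py_alt (col_spec : List (String × Int × String)) (rows : List (List String)) : List (String × Int × String) :=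
  let headers_in_spec := PySem.Set.ofList (col_spec.map (·.1))
  let note_to_idx : PySem.Dict String Int :=
    col_spec.foldl (fun d c =>
      if pvDiffGroups.any (fun g => g.1 == c.1) && !(d.contains c.1) then d.insert c.1 c.2.1 else d)
      PySem.Dict.empty
  let empty_notes := rows.foldl (fun es r =>
      es.filter (fun n =>
        !(decide (note_to_idx.getD n 0 < (r.length : Int)) && !(PySem.List.pyGetD r (note_to_idx.getD n 0) "" == ""))))
    (PySem.Dict.keys note_to_idx)
  let cols_to_remove := empty_notes.foldl (fun acc n =>
      PySem.Set.union acc (PySem.Set.inter (PySem.Set.ofList (((pvDiffGroups.find? (fun g => g.1 == n)).map (·.2)).getD [])) headers_in_spec))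
    PySem.Set.empty
  col_spec.filter (fun c => !(PySem.Set.contains cols_to_remove c.1))

-- ===== PRECONDITION & SPEC =====
-- Pre_ excludes inputs where a diff-note column carries a negative index that underflows some row
-- (Python IndexError); it conservatively requires every diff-note column's negative index to be in
-- range for every row, so a few inputs where short-circuiting (or a shadowed duplicate column)
-- lets A return are excluded too — both programs return the same value there.
def Pre_filter_no_diff_cols_py (col_spec : List (String × Int × String)) (rows : List (List String)) : Prop :=
  ∀ c ∈ col_spec, pvDiffGroups.any (fun g => g.1 == c.1) = true → c.2.1 < 0 →
    ∀ r ∈ rows, -c.2.1 ≤ (r.length : Int)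
instance (col_spec : List (String × Int × String)) (rows : List (List String)) : Decidable (Pre_filter_no_diff_cols_py col_spec rows) := by unfold Pre_filter_no_diff_cols_py; infer_instance

def pvWitness_filter_no_diff_cols_py : (List (String × Int × String)) × List (List String) :=
  ([("nD", 1, "note"), ("descF", 0, "file")], [["eth0", ""]])

def Spec_filter_no_diff_cols_py (col_spec : List (String × Int × String)) (rows : List (List String)) (out : List (String × Int × String)) : Prop := out = filter_no_diff_cols_py_alt col_spec rows
instance (col_spec : List (String × Int × String)) (rows : List (List String)) (out : List (String × Int × String)) : Decidable (Spec_filter_no_diff_cols_py col_spec rows out) := by unfold Spec_filter_no_diff_cols_py; infer_instance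

-- ===== CLAIM (what is proved, stated in full; the proofs are below) =====
def Claim_equal_filter_no_diff_cols_py : Prop := ∀ (col_spec : List (String × Int × String)) (rows : List (List String)), Dom_filter_no_diff_cols_py col_spec rows → Pre_filter_no_diff_cols_py col_spec rows → Spec_filter_no_diff_cols_py col_spec rows (filter_no_diff_cols_py col_spec rows)

-- ===== LEMMAS AND PROOFS =====

-- emptiness test of a cell, shared shape of both ports' row predicates
def pvCellEmpty (i : Int) (r : List String) : Bool :=
  decide ((r.length : Int) ≤ i) || (PySem.List.pyGetD r i "" == "")

theorem pvPredEq (i : Int) (r : List String) :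
    (!(decide (i < (r.length : Int)) && !(PySem.List.pyGetD r i "" == ""))) = pvCellEmpty i r := by
  unfold pvCellEmpty
  by_cases h : i < (r.length : Int) <;> by_cases h2 : (PySem.List.pyGetD r i "" = "") <;>
    simp [h, h2] <;> omega

theorem pvFoldlFilterAll {α β : Type} (l : List β) (p : β → α → Bool) (es : List α) :
    l.foldl (fun es r => es.filter (p r)) es = es.filter (fun x => l.all (fun r => p r x)) := by
  induction l generalizing es with
  | nil => simp
  | cons r l ih =>
    rw [List.foldl_cons, ih, List.filter_filter]
    refine List.filter_congr fun a _ => ?_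
    simp [Bool.and_comm]

theorem pvMemFoldlUnion {β : Type} (l : List β) (cond : β → Bool) (g : β → List String)
    (acc : List String) (h : String) :
    h ∈ l.foldl (fun acc x => if cond x then PySem.Set.union acc (g x) else acc) acc ↔
      h ∈ acc ∨ ∃ x ∈ l, cond x = true ∧ h ∈ g x := by
  induction l generalizing acc with
  | nil => simp
  | cons y l ih =>
    rw [List.foldl_cons, ih]
    by_cases hc : cond y <;> simp [hc, PySem.Set.mem_union] <;> tauto

theorem pvFindKey : ∀ ng ∈ pvDiffGroups, pvDiffGroups.find? (fun g => g.1 == ng.1) = some ng := by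
  decide

-- the dict built by B: a present key keeps its value …
theorem pvGetBuildSome (P : String → Bool) (cs : List (String × Int × String))
    (d : PySem.Dict String Int) (n : String) (v : Int) (hd : d.get? n = some v) :
    (cs.foldl (fun d c => if P c.1 && !(d.contains c.1) then d.insert c.1 c.2.1 else d) d).get? n = some v := by
  induction cs generalizing d with
  | nil => exact hd
  | cons c cs ih =>
    rw [List.foldl_cons]
    by_cases hP : (P c.1 && !(d.contains c.1)) = true
    · simp only [hP, if_true]
      apply ih
      rw [PySem.Dict.get?_insert]
      split
      · rename_i he
        subst he
        simp [PySem.Dict.contains_eq_isSome_get?, hd] at hP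
      · exact hd
    · simp only [hP, if_false]
      exact ih d hd

-- … and an absent key gets the FIRST col_spec index iff its name passes P
theorem pvGetBuildNone (P : String → Bool) (cs : List (String × Int × String))
    (d : PySem.Dict String Int) (n : String) (hd : d.get? n = none) :
    (cs.foldl (fun d c => if P c.1 && !(d.contains c.1) then d.insert c.1 c.2.1 else d) d).get? n =
      if P n then (cs.find? (fun c => c.1 == n)).map (·.2.1) else none := by
  induction cs generalizing d with
  | nil => simp [hd]
  | cons c cs ih =>
    rw [List.foldl_cons]
    by_cases he : c.1 = n
    · subst he
      have hcont : d.contains c.1 = false := by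
        rw [PySem.Dict.contains_eq_isSome_get?, hd]; rfl
      by_cases hP : P c.1 = true
      · rw [if_pos (by simp [hP, hcont]),
            pvGetBuildSome P cs (d.insert c.1 c.2.1) c.1 c.2.1 (PySem.Dict.get?_insert_self d c.1 c.2.1),
            if_pos hP, List.find?_cons_of_pos (by simp)]
        rfl
      · rw [if_neg (by simp [Bool.not_eq_true] at hP ⊢; simp [hP]), ih d hd, if_neg hP, if_neg hP]
    · have hfind : ((c :: cs).find? (fun x => x.1 == n)) = cs.find? (fun x => x.1 == n) :=
        List.find?_cons_of_neg (by simp [he])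
      rw [hfind]
      by_cases hP : (P c.1 && !(d.contains c.1)) = true
      · rw [if_pos hP]
        apply ih
        rw [PySem.Dict.get?_insert, if_neg (Ne.symm he)]
        exact hd
      · rw [if_neg hP]
        exact ih d hd

-- A's per-group condition and contribution, used to reshape A's fold into if/union form
def pvCondA (col_spec : List (String × Int × String)) (rows : List (List String))
    (ng : String × List String) : Bool :=
  match col_spec.find? (fun c => c.1 == ng.1) with
  | some nc => rows.all (pvCellEmpty nc.2.1)
  | none => false

def pvGroupsOf (col_spec : List (String × Int × String)) (ng : String × List String) : List String :=
  PySem.Set.inter (PySem.Set.ofList ng.2) (PySem.Set.ofList (col_spec.map (·.1)))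

theorem pvMemFoldlUnion' {β : Type} (l : List β) (g : β → List String)
    (acc : List String) (h : String) :
    h ∈ l.foldl (fun acc x => PySem.Set.union acc (g x)) acc ↔
      h ∈ acc ∨ ∃ x ∈ l, h ∈ g x := by
  induction l generalizing acc with
  | nil => simp
  | cons y l ih =>
    rw [List.foldl_cons, ih]
    simp [PySem.Set.mem_union]
    tauto

theorem filter_no_diff_cols_py_spec : Claim_equal_filter_no_diff_cols_py := by
  intro col_spec rows _hDom _hPre
  unfold Spec_filter_no_diff_cols_py
  simp only [filter_no_diff_cols_py, filter_no_diff_cols_py_alt]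
  have hstepeq : (fun (acc : List String) (ng : String × List String) =>
      if !(PySem.Set.contains (PySem.Set.ofList (col_spec.map (·.1))) ng.1) then acc
      else
        match col_spec.find? (fun c => c.1 == ng.1) with
        | none => acc
        | some note_col =>
          if rows.all (fun r => decide ((r.length : Int) ≤ note_col.2.1) || (PySem.List.pyGetD r note_col.2.1 "" == "")) then
            PySem.Set.union acc (PySem.Set.inter (PySem.Set.ofList ng.2) (PySem.Set.ofList (col_spec.map (·.1))))
          else acc)
      = (fun acc ng => if pvCondA col_spec rows ng then PySem.Set.union acc (pvGroupsOf col_spec ng) else acc) := by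
    funext acc ng
    by_cases hcont : PySem.Set.contains (PySem.Set.ofList (col_spec.map (·.1))) ng.1 = true
    · rw [if_neg (by rw [hcont]; simp)]
      cases hf : col_spec.find? (fun c => c.1 == ng.1) with
      | none => simp [pvCondA, hf]
      | some nc =>
        simp only [pvCondA, hf, pvGroupsOf]
        rfl
    · rw [if_pos (by rw [Bool.not_eq_true] at hcont; rw [hcont]; rfl)]
      cases hf : col_spec.find? (fun c => c.1 == ng.1) with
      | none => simp [pvCondA, hf]
      | some nc =>
        exfalso
        apply hcont
        rw [PySem.Set.contains_iff, PySem.Set.mem_ofList]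
        exact List.mem_map.mpr ⟨nc, List.mem_of_find?_eq_some hf, by simpa using List.find?_some hf⟩
  rw [hstepeq, pvFoldlFilterAll]
  have hget : ∀ n : String,
      (col_spec.foldl (fun d c => if pvDiffGroups.any (fun g => g.1 == c.1) && !(d.contains c.1) then d.insert c.1 c.2.1 else d) PySem.Dict.empty).get? n =
      if pvDiffGroups.any (fun g => g.1 == n) then (col_spec.find? (fun c => c.1 == n)).map (·.2.1) else none :=
    fun n => pvGetBuildNone (fun s => pvDiffGroups.any (fun g => g.1 == s)) col_spec PySem.Dict.empty n rfl
  refine List.filter_congr fun c _hc => ?_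
  congr 1
  rw [Bool.eq_iff_iff, PySem.Set.contains_iff, PySem.Set.contains_iff,
      pvMemFoldlUnion pvDiffGroups (pvCondA col_spec rows) (pvGroupsOf col_spec) PySem.Set.empty c.1,
      pvMemFoldlUnion']
  simp only [PySem.Set.empty, List.not_mem_nil, false_or, List.mem_filter]
  constructor
  · rintro ⟨ng, hng, hcond, hmem⟩
    unfold pvCondA at hcond
    cases hfind : col_spec.find? (fun c => c.1 == ng.1) with
    | none => rw [hfind] at hcond; exact absurd hcond (by simp)
    | some nc =>
      rw [hfind] at hcond
      have hP : pvDiffGroups.any (fun g => g.1 == ng.1) = true :=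
        List.any_eq_true.mpr ⟨ng, hng, by simp⟩
      have hg : (col_spec.foldl (fun d c => if pvDiffGroups.any (fun g => g.1 == c.1) && !(d.contains c.1) then d.insert c.1 c.2.1 else d) PySem.Dict.empty).get? ng.1 = some nc.2.1 := by
        rw [hget ng.1, if_pos hP, hfind]
        rfl
      have hgd : (col_spec.foldl (fun d c => if pvDiffGroups.any (fun g => g.1 == c.1) && !(d.contains c.1) then d.insert c.1 c.2.1 else d) PySem.Dict.empty).getD ng.1 0 = nc.2.1 := by
        rw [PySem.Dict.getD_eq_get?_getD, hg]
        rfl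
      refine ⟨ng.1, ⟨?_, ?_⟩, ?_⟩
      · refine (PySem.Dict.contains_iff_mem_keys _ _).mp ?_
        rw [PySem.Dict.contains_eq_isSome_get?, hg]
        rfl
      · rw [hgd, show (fun r : List String => !(decide (nc.2.1 < (r.length : Int)) && !(PySem.List.pyGetD r nc.2.1 "" == ""))) = pvCellEmpty nc.2.1 from funext fun r => pvPredEq nc.2.1 r]
        exact hcond
      · rw [pvFindKey ng hng]
        simpa [pvGroupsOf] using hmem
  · rintro ⟨n, ⟨hkeys, hallB⟩, hmemB⟩
    have hcont : (col_spec.foldl (fun d c => if pvDiffGroups.any (fun g => g.1 == c.1) && !(d.contains c.1) then d.insert c.1 c.2.1 else d) PySem.Dict.empty).contains n = true :=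
      (PySem.Dict.contains_iff_mem_keys _ _).mpr hkeys
    rw [PySem.Dict.contains_eq_isSome_get?, hget n] at hcont
    by_cases hP : pvDiffGroups.any (fun g => g.1 == n) = true
    · rw [if_pos hP] at hcont
      obtain ⟨g, hgmem, hbq⟩ := List.any_eq_true.mp hP
      have hn : g.1 = n := by simpa using hbq
      cases hfind : col_spec.find? (fun c => c.1 == n) with
      | none => rw [hfind] at hcont; exact absurd hcont (by simp)
      | some nc =>
        have hgd : (col_spec.foldl (fun d c => if pvDiffGroups.any (fun g => g.1 == c.1) && !(d.contains c.1) then d.insert c.1 c.2.1 else d) PySem.Dict.empty).getD n 0 = nc.2.1 := by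
          rw [PySem.Dict.getD_eq_get?_getD, hget n, if_pos hP, hfind]
          rfl
        refine ⟨g, hgmem, ?_, ?_⟩
        · unfold pvCondA
          rw [hn, hfind]
          rw [hgd, show (fun r : List String => !(decide (nc.2.1 < (r.length : Int)) && !(PySem.List.pyGetD r nc.2.1 "" == ""))) = pvCellEmpty nc.2.1 from funext fun r => pvPredEq nc.2.1 r] at hallB
          exact hallB
        · rw [← hn, pvFindKey g hgmem] at hmemB
          simpa [pvGroupsOf] using hmemB
    · rw [if_neg hP] at hcont
      exact absurd hcont (by simp)
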